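-- pv_equiv track=rewrite | github.com/Karthikdude/OpenX | utils/evasion/waf_bypass.py | _unicode_encode
-- ===== SOURCE A (Python) =====
-- def _unicode_encode(text: str) -> str:
--     """Unicode encode the text"""
--     # Convert to unicode but keep the structure
--     parts = []
--     for part in text.split('&'):
--         if '=' in part:
--             key, value = part.split('=', 1)
--             unicode_value = ''.join([f'%u00{ord(c):02X}' for c in value])
--             parts.append(f"{key}={unicode_value}")
--         else:
--             parts.append(part)
--
--     return '&'.join(parts)
-- ===== SOURCE B (Python) =====
-- def _unicode_encode(text: str) -> str:
--     """Unicode encode the text (single state-machine pass, no split/join of parts)"""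
--     out = []
--     in_value = False
--     for c in text:
--         if c == '&':
--             out.append(c)
--             in_value = False
--         elif c == '=' and not in_value:
--             out.append(c)
--             in_value = True
--         elif in_value:
--             out.append(f'%u00{ord(c):02X}')
--         else:
--             out.append(c)
--     return ''.join(out)
-- ===== Notes on version B (the rewrite author's own statement) =====
-- stated objective: alternative
-- what changed: Replaced split('&') + per-part split('=',1) + nested comprehension + '&'.join with a single character-by-character state-machine pass keeping one in_value flag.
import Mathlib
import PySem

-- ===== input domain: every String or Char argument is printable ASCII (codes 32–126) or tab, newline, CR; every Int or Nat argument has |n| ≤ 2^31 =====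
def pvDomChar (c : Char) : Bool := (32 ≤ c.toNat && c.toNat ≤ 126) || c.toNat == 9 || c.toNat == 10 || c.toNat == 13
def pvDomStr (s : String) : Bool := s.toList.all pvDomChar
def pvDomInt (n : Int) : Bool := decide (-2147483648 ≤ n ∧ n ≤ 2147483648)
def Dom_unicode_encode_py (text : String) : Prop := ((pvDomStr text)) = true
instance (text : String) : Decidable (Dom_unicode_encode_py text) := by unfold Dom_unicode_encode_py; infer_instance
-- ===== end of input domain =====

-- B replaces A's split('&')/split('=',1)/join decomposition by one flat state-machine scan (same cost, different traversal).

-- shared formatting helper: f'%u00{ord(c):02X}' — exact for ord(c) ≤ 255 (Dom guarantees ≤ 126)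
def pvHexDig (n : Nat) : Char := if n < 10 then Char.ofNat (48 + n) else Char.ofNat (55 + n)
def pvEnc (c : Char) : List Char := ['%', 'u', '0', '0', pvHexDig (c.toNat / 16), pvHexDig (c.toNat % 16)]

-- ===== PORT A =====
def unicode_encode_py (text : String) : String :=
  -- parts = []; for part in text.split('&'): …; return '&'.join(parts)
  let parts := (PySem.Chars.splitOn text.toList ['&']).foldl (fun parts part =>
    if PySem.Chars.isIn ['='] part then
      match PySem.Chars.splitOnMax part ['='] 1 with   -- key, value = part.split('=', 1)
      | [key, value] =>
          let unicode_value := PySem.Chars.join [] (value.map pvEnc)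
          parts ++ [key ++ '=' :: unicode_value]
      | _ => parts ++ [part]  -- unreachable: split('=',1) has exactly 2 pieces when '=' in part
    else parts ++ [part]) []
  String.mk (PySem.Chars.join ['&'] parts)

-- ===== PORT B =====
-- loop body of B: one character step of the state machine (state = (in_value, out))
def pvStepB (st : Bool × List (List Char)) (c : Char) : Bool × List (List Char) :=
  if c = '&' then (false, st.2 ++ [[c]])
  else if c = '=' && !st.1 then (true, st.2 ++ [[c]])
  else if st.1 then (st.1, st.2 ++ [pvEnc c])
  else (st.1, st.2 ++ [[c]])

def unicode_encode_py_alt (text : String) : String :=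
  -- out = []; in_value = False; for c in text: …append…; return ''.join(out)
  let st := text.toList.foldl pvStepB (false, [])
  String.mk (PySem.Chars.join [] st.2)

-- ===== PRECONDITION & SPEC =====
def Spec_unicode_encode_py (text : String) (out : String) : Prop := out = unicode_encode_py_alt text
instance (text : String) (out : String) : Decidable (Spec_unicode_encode_py text out) := by unfold Spec_unicode_encode_py; infer_instance

-- ===== CLAIM (what is proved, stated in full; the proofs are below) =====
def Claim_equal_unicode_encode_py : Prop := ∀ (text : String), Dom_unicode_encode_py text → Spec_unicode_encode_py text (unicode_encode_py text)

-- ===== LEMMAS AND PROOFS =====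

-- simple recursive characterisation of text.split('&')
def pvSplitAmp (l : List Char) : List (List Char) :=
  l.takeWhile (· ≠ '&') ::
    (if h : (l.dropWhile (· ≠ '&')) = [] then []
     else pvSplitAmp ((l.dropWhile (· ≠ '&')).tail))
termination_by l.length
decreasing_by
  have h2 : (List.dropWhile (· ≠ '&') l).length ≤ l.length := List.length_dropWhile_le _ _
  have h3 : (List.dropWhile (· ≠ '&') l).length ≠ 0 := by
    simpa [List.length_eq_zero_iff] using h
  simp only [List.length_tail]
  omega

-- structural-recursion version of B's scan
def pvScan : List Char → Bool → List Char
  | [], _ => []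
  | c :: cs, inv =>
      if c = '&' then c :: pvScan cs false
      else if c = '=' && !inv then c :: pvScan cs true
      else if inv then pvEnc c ++ pvScan cs inv
      else c :: pvScan cs inv

-- what A does to one part
def pvAPart (p : List Char) : List Char :=
  if '=' ∈ p then
    p.takeWhile (· ≠ '=') ++ '=' :: ((p.dropWhile (· ≠ '=')).tail.map pvEnc).flatten
  else p

lemma pv_join_nil_flatten (xs : List (List Char)) : PySem.Chars.join [] xs = xs.flatten := by
  match xs with
  | [] => simp [PySem.Chars.join, List.intercalate]
  | [p] => simp [PySem.Chars.join_singleton]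
  | p :: q :: rest =>
      rw [PySem.Chars.join_cons_cons]
      simp [pv_join_nil_flatten (q :: rest)]

lemma pv_isIn_eq_mem (p : List Char) : PySem.Chars.isIn ['='] p = ('=' ∈ p : Bool) := by
  by_cases h : '=' ∈ p
  · have hinf : ['='] <:+: p := by
      obtain ⟨s, t, rfl⟩ := List.append_of_mem h
      exact ⟨s, t, by simp⟩
    simp [h, (PySem.Chars.isIn_iff_infix _ _).2 hinf]
  · rw [(PySem.Chars.isIn_eq_false_iff _ _).2 (fun hinf => h (hinf.subset (by simp)))]
    simp [h]

lemma pvSplitAmp_nil : pvSplitAmp [] = [[]] := by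
  rw [pvSplitAmp.eq_def]; simp

lemma pvSplitAmp_head (l : List Char) :
    ∃ t, pvSplitAmp l = l.takeWhile (· ≠ '&') :: t := by
  rw [pvSplitAmp.eq_def]; exact ⟨_, rfl⟩

lemma pvSplitAmp_amp (cs : List Char) : pvSplitAmp ('&' :: cs) = [] :: pvSplitAmp cs := by
  rw [pvSplitAmp.eq_def]
  simp [List.takeWhile_cons, List.dropWhile_cons]

lemma pvSplitAmp_cons_ne (c : Char) (cs : List Char) (hc : c ≠ '&') :
    pvSplitAmp (c :: cs) = (pvSplitAmp cs).modifyHead (c :: ·) := by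
  rw [pvSplitAmp.eq_def, pvSplitAmp.eq_def cs]
  simp [List.takeWhile_cons, List.dropWhile_cons, hc]

-- splitOn.go with sep '&' computes pvSplitAmp
lemma pv_splitOn_go (fuel : Nat) (l cur : List Char) (acc : List (List Char))
    (hf : l.length ≤ fuel) :
    PySem.Chars.splitOn.go ['&'] fuel l cur acc
      = acc.reverse ++ (pvSplitAmp l).modifyHead (cur.reverse ++ ·) := by
  induction fuel generalizing l cur acc with
  | zero =>
      have : l = [] := by simpa using List.length_eq_zero_iff.mp (Nat.le_zero.mp hf)
      subst this
      simp [PySem.Chars.splitOn.go, pvSplitAmp_nil]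
  | succ f ih =>
      match l with
      | [] => simp [PySem.Chars.splitOn.go, pvSplitAmp_nil]
      | c :: rest =>
          by_cases hc : c = '&'
          · subst hc
            have hpre : List.isPrefixOf ['&'] ('&' :: rest) = true := by simp [List.isPrefixOf]
            rw [PySem.Chars.splitOn.go]
            simp only [hpre, if_true, List.length_cons, List.length_nil, Nat.zero_add,
              List.drop_succ_cons, List.drop_zero]
            rw [ih rest [] (cur.reverse :: acc) (by simpa using Nat.le_of_succ_le_succ hf)]
            obtain ⟨t, ht⟩ := pvSplitAmp_head rest
            simp [pvSplitAmp_amp, ht, List.modifyHead]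
          · have hpre : List.isPrefixOf ['&'] (c :: rest) = false := by
              simp [List.isPrefixOf]; exact fun h => absurd h.symm hc
            rw [PySem.Chars.splitOn.go]
            simp only [hpre, Bool.false_eq_true, if_false]
            rw [ih rest (c :: cur) acc (by simpa using Nat.le_of_succ_le_succ hf)]
            rw [pvSplitAmp_cons_ne c rest hc]
            obtain ⟨t, ht⟩ := pvSplitAmp_head rest
            simp [ht, List.modifyHead]

lemma pv_splitOn_amp (l : List Char) :
    PySem.Chars.splitOn l ['&'] = pvSplitAmp l := by
  rw [PySem.Chars.splitOn, pv_splitOn_go (l.length + 1) l [] [] (by omega)]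
  obtain ⟨t, ht⟩ := pvSplitAmp_head l
  simp [ht, List.modifyHead]

-- splitOnMax.go with maxsplit exhausted
lemma pv_splitOnMax_go_zero (fuel : Nat) (l cur : List Char) (acc : List (List Char)) :
    PySem.Chars.splitOnMax.go ['='] fuel 0 l cur acc = acc.reverse ++ [cur.reverse ++ l] := by
  match fuel, l with
  | 0, l => simp [PySem.Chars.splitOnMax.go]
  | f + 1, [] => simp [PySem.Chars.splitOnMax.go]
  | f + 1, c :: rest => simp [PySem.Chars.splitOnMax.go]

-- splitOnMax.go with sep '=', maxsplit 1
lemma pv_splitOnMax_go_one (fuel : Nat) (l cur : List Char) (acc : List (List Char))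
    (hf : l.length ≤ fuel) :
    PySem.Chars.splitOnMax.go ['='] fuel 1 l cur acc
      = acc.reverse ++ (if '=' ∈ l
          then [cur.reverse ++ l.takeWhile (· ≠ '='), (l.dropWhile (· ≠ '=')).tail]
          else [cur.reverse ++ l]) := by
  induction fuel generalizing l cur acc with
  | zero =>
      have : l = [] := by simpa using List.length_eq_zero_iff.mp (Nat.le_zero.mp hf)
      subst this
      simp [PySem.Chars.splitOnMax.go]
  | succ f ih =>
      match l with
      | [] => simp [PySem.Chars.splitOnMax.go]
      | c :: rest =>
          by_cases hc : c = '='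
          · subst hc
            have hpre : List.isPrefixOf ['='] ('=' :: rest) = true := by simp [List.isPrefixOf]
            rw [PySem.Chars.splitOnMax.go]
            simp only [hpre, if_true, Nat.succ_ne_zero, if_false]
            rw [show (1 : Nat) - 1 = 0 from rfl]
            simp only [List.length_cons, List.length_nil, Nat.zero_add,
              List.drop_succ_cons, List.drop_zero]
            rw [pv_splitOnMax_go_zero]
            simp [List.takeWhile_cons, List.dropWhile_cons]
          · have hpre : List.isPrefixOf ['='] (c :: rest) = false := by
              simp [List.isPrefixOf]; exact fun h => absurd h.symm hc
            rw [PySem.Chars.splitOnMax.go]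
            simp only [hpre, Bool.false_eq_true, if_false, Nat.succ_ne_zero]
            rw [ih rest (c :: cur) acc (by simpa using Nat.le_of_succ_le_succ hf)]
            by_cases hm : '=' ∈ rest
            · simp [List.takeWhile_cons, List.dropWhile_cons, hc, hm, Ne.symm hc]
            · simp [List.takeWhile_cons, List.dropWhile_cons, hc, hm, Ne.symm hc]

lemma pv_splitOnMax_one (l : List Char) :
    PySem.Chars.splitOnMax l ['='] 1
      = if '=' ∈ l then [l.takeWhile (· ≠ '='), (l.dropWhile (· ≠ '=')).tail] else [l] := by
  rw [PySem.Chars.splitOnMax]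
  simp only [show ¬ ((1 : Int) < 0) by norm_num, if_false]
  rw [show (1 : Int).toNat = 1 from rfl, pv_splitOnMax_go_one (l.length + 1) l [] [] (by omega)]
  simp

-- A's per-part step is pvAPart
lemma pv_step_eq (parts : List (List Char)) (part : List Char) :
    (if PySem.Chars.isIn ['='] part then
      match PySem.Chars.splitOnMax part ['='] 1 with
      | [key, value] => parts ++ [key ++ '=' :: PySem.Chars.join [] (value.map pvEnc)]
      | _ => parts ++ [part]
     else parts ++ [part]) = parts ++ [pvAPart part] := by
  by_cases h : '=' ∈ part
  · simp [pv_isIn_eq_mem, h, pv_splitOnMax_one, pvAPart, pv_join_nil_flatten]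
  · simp [pv_isIn_eq_mem, h, pvAPart]

-- A's whole result, list-level
def pvJoinA (l : List Char) : List Char :=
  PySem.Chars.join ['&'] ((pvSplitAmp l).map pvAPart)

lemma pv_joinA_eq (l : List Char) :
    pvJoinA l = pvAPart (l.takeWhile (· ≠ '&')) ++
      (match l.dropWhile (· ≠ '&') with
       | [] => []
       | _ :: r => '&' :: pvJoinA r) := by
  unfold pvJoinA
  rw [pvSplitAmp.eq_def]
  match h : l.dropWhile (· ≠ '&') with
  | [] => simp [h, PySem.Chars.join_singleton]
  | c :: r =>
      obtain ⟨t, ht⟩ := pvSplitAmp_head r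
      rw [dif_neg (by simp)]
      simp only [List.tail_cons, ht, List.map_cons]
      rw [PySem.Chars.join_cons_cons]
      simp [pvJoinA, ht]

lemma pv_aPart_cons (c : Char) (w : List Char) (hc : c ≠ '=') :
    pvAPart (c :: w) = c :: pvAPart w := by
  by_cases h : '=' ∈ w
  · simp [pvAPart, h, Ne.symm hc, List.takeWhile_cons, List.dropWhile_cons, hc]
  · simp [pvAPart, h, Ne.symm hc, List.mem_cons]

lemma pv_aPart_eqhead (w : List Char) :
    pvAPart ('=' :: w) = '=' :: (w.map pvEnc).flatten := by
  simp [pvAPart, List.takeWhile_cons, List.dropWhile_cons]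

-- the central equivalence: B's scan computes A's join-of-parts
lemma pv_scan_eq (cs : List Char) :
    pvScan cs false = pvJoinA cs ∧
    pvScan cs true = ((cs.takeWhile (· ≠ '&')).map pvEnc).flatten ++
      (match cs.dropWhile (· ≠ '&') with
       | [] => []
       | _ :: r => '&' :: pvJoinA r) := by
  induction cs with
  | nil => constructor <;> simp [pvScan, pvJoinA, pvSplitAmp_nil, pvAPart, PySem.Chars.join_singleton]
  | cons c cs ih =>
      obtain ⟨ihP, ihQ⟩ := ih
      constructor
      · by_cases hc : c = '&'
        · subst hc
          rw [pv_joinA_eq]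
          simp [pvScan, List.takeWhile_cons, List.dropWhile_cons, pvAPart, ihP]
        · by_cases he : c = '='
          · subst he
            rw [pv_joinA_eq ('=' :: cs)]
            simp [pvScan, List.takeWhile_cons, List.dropWhile_cons, pv_aPart_eqhead, ihQ]
          · rw [pv_joinA_eq (c :: cs)]
            simp only [List.takeWhile_cons, List.dropWhile_cons, hc, he, decide_false,
              decide_true, ne_eq, decide_not, Bool.not_false, Bool.not_true, if_true,
              decide_eq_true_eq, if_neg hc, ite_true]
            rw [pv_aPart_cons c _ he]
            simp [pvScan, hc, he, ihP, pv_joinA_eq cs]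
      · by_cases hc : c = '&'
        · subst hc
          simp [pvScan, List.takeWhile_cons, List.dropWhile_cons, ihP]
        · simp only [pvScan, if_neg hc, Bool.not_true, Bool.and_false, Bool.false_eq_true,
            if_false, if_true]
          simp [hc, List.takeWhile_cons, List.dropWhile_cons, ihQ]

-- B's foldl accumulates pvScan
lemma pv_fold_eq (cs : List Char) (inv : Bool) (out : List (List Char)) :
    (cs.foldl pvStepB (inv, out)).2.flatten = out.flatten ++ pvScan cs inv := by
  induction cs generalizing inv out with
  | nil => simp [pvScan]
  | cons c cs ih =>
      rw [List.foldl_cons]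
      by_cases hc : c = '&'
      · subst hc
        rw [show pvStepB (inv, out) '&' = (false, out ++ [['&']]) from by simp [pvStepB]]
        rw [ih]; simp [pvScan]
      · by_cases he : c = '='
        · subst he
          cases inv with
          | false =>
              rw [show pvStepB (false, out) '=' = (true, out ++ [['=']]) from by simp [pvStepB, hc]]
              rw [ih]; simp [pvScan, hc]
          | true =>
              rw [show pvStepB (true, out) '=' = (true, out ++ [pvEnc '=']) from by simp [pvStepB, hc]]
              rw [ih]; simp [pvScan, hc]
        · cases inv with
          | true =>
              rw [show pvStepB (true, out) c = (true, out ++ [pvEnc c]) from by simp [pvStepB, hc]]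
              rw [ih]; simp [pvScan, hc]
          | false =>
              rw [show pvStepB (false, out) c = (false, out ++ [[c]]) from by simp [pvStepB, hc, he]]
              rw [ih]; simp [pvScan, hc, he]

-- ===== VERDICT (by name: the statement is the Claim_ definition above) =====
theorem unicode_encode_py_spec : Claim_equal_unicode_encode_py := by
  intro text _
  unfold Spec_unicode_encode_py unicode_encode_py unicode_encode_py_alt
  rw [pv_splitOn_amp]
  have hA : ∀ (ps acc : List (List Char)), ps.foldl (fun parts part =>
      if PySem.Chars.isIn ['='] part then
        match PySem.Chars.splitOnMax part ['='] 1 with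
        | [key, value] => parts ++ [key ++ '=' :: PySem.Chars.join [] (value.map pvEnc)]
        | _ => parts ++ [part]
      else parts ++ [part]) acc = acc ++ ps.map pvAPart := by
    intro ps
    induction ps with
    | nil => simp
    | cons p ps ih => intro acc; rw [List.foldl_cons, pv_step_eq, ih]; simp
  rw [hA]
  simp only [List.nil_append]
  simp [pv_join_nil_flatten, pv_fold_eq, (pv_scan_eq text.toList).1, pvJoinA]
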